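-- pv_equiv track=rewrite | github.com/vikinam97/LeetHub | Change Bits - GFG/change-bits.py | changeBits
-- ===== SOURCE A (Python) =====
-- def changeBits(N):
--     Nprime = 0
--     temp, i = N, 0
--     while temp != 0:
--         Nprime = Nprime | 1 << i
--         temp = temp >> 1
--         i += 1
--
--     return [Nprime - N, Nprime]
-- ===== SOURCE B (Python) =====
-- def changeBits(N):
--     Nprime = (1 << N.bit_length()) - 1
--     return [Nprime - N, Nprime]
-- ===== Notes on version B (the rewrite author's own statement) =====
-- stated objective: simpler
-- what changed: Replaces the bit-by-bit OR-accumulating while loop by the closed-form mask computed via bit_length.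
import Mathlib
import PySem

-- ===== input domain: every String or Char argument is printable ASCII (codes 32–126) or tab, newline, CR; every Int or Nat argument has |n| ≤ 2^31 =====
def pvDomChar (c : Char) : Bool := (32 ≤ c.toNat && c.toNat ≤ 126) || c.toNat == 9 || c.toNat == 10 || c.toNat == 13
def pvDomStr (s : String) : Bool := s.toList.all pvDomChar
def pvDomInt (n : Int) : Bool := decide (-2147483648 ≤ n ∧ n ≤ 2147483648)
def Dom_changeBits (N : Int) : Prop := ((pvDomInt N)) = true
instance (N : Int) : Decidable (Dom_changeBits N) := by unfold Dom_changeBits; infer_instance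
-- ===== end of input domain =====

-- B replaces A's bit-by-bit OR-accumulating while loop with the closed-form mask
-- (1 << N.bit_length()) - 1 (objective: simpler).

-- used by PORT A's decreasing_by (must precede it)
lemma shiftR_natCast (t : Nat) : ((t:Int) >>> (1:Nat)) = ((t / 2 : Nat) : Int) := by
  rw [show ((t:Int) >>> (1:Nat)) = ((t >>> 1 : Nat) : Int) from
    by exact_mod_cast (Int.natCast_shiftRight t 1).symm]
  simp [Nat.shiftRight_succ]

-- ===== PORT A =====
-- A's while loop; the `temp < 0` branch is only a totality guard: Python's loop never
-- terminates for negative temp (those inputs are outside Pre_)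
def changeBitsLoopA (Nprime temp : Int) (i : Nat) : Int :=
  if temp = 0 then Nprime
  else if temp < 0 then Nprime
  else changeBitsLoopA (PySem.Int.bor Nprime ((1:Int) <<< i)) (temp >>> (1:Nat)) (i + 1)
termination_by temp.toNat
decreasing_by
  have h1 : temp >>> (1:Nat) = ((temp.toNat / 2 : Nat) : Int) := by
    rw [show temp = ((temp.toNat : Nat) : Int) by omega]; exact shiftR_natCast temp.toNat
  omega

def changeBits (N : Int) : List Int :=
  let Nprime := changeBitsLoopA 0 N 0
  [Nprime - N, Nprime]

-- ===== PORT B =====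
def changeBits_alt (N : Int) : List Int :=
  let Nprime : Int := ((1:Int) <<< PySem.Int.bitLength N) - 1
  [Nprime - N, Nprime]

-- ===== PRECONDITION & SPEC =====
-- Pre_ excludes negative N: there Python A's `while temp != 0` loop never terminates
-- (arithmetic right shift of a negative int eventually stays -1), so A returns no value.
def Pre_changeBits (N : Int) : Prop := 0 ≤ N
instance (N : Int) : Decidable (Pre_changeBits N) := by unfold Pre_changeBits; infer_instance
def pvWitness_changeBits : Int := (5)
def Spec_changeBits (N : Int) (out : List Int) : Prop := out = changeBits_alt N
instance (N : Int) (out : List Int) : Decidable (Spec_changeBits N out) := by unfold Spec_changeBits; infer_instance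

-- ===== CLAIM =====
def Claim_equal_changeBits : Prop := ∀ (N : Int), Dom_changeBits N → Pre_changeBits N → Spec_changeBits N (changeBits N)

-- ===== LEMMAS AND PROOFS =====
lemma nat_lor_pow (i : Nat) : (2 ^ i - 1) ||| 2 ^ i = 2 ^ (i + 1) - 1 := by
  apply Nat.eq_of_testBit_eq
  intro j
  simp only [Nat.testBit_lor, Nat.testBit_two_pow, Nat.testBit_two_pow_sub_one]
  by_cases h : j < i <;> by_cases h2 : i = j <;> simp_all <;> omega

lemma int_bor_pow (i : Nat) : PySem.Int.bor ((2:Int)^i - 1) ((1:Int) <<< i) = 2^(i+1) - 1 := by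
  have hs : ((1:Int) <<< i) = 2 ^ i := by simp [Int.shiftLeft_eq]
  have h1 : ((2:Int)^i - 1) = ((2^i - 1 : Nat) : Int) := by
    push_cast [Nat.one_le_two_pow]; ring
  have h2 : ((2:Int)^i) = ((2^i : Nat) : Int) := by push_cast; ring
  rw [hs, h1, h2, PySem.Int.bor_natCast, nat_lor_pow]
  push_cast [Nat.one_le_two_pow]; ring

lemma loopA_closed : ∀ t : Nat, ∀ i : Nat,
    changeBitsLoopA ((2:Int)^i - 1) (t : Int) i = 2 ^ (i + PySem.Int.bitLength (t : Int)) - 1 := by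
  intro t
  induction t using Nat.strong_induction_on with
  | _ t ih =>
    intro i
    by_cases h : t = 0
    · subst h
      rw [changeBitsLoopA]
      simp [PySem.Int.bitLength_zero]
    · have ht : (0:Int) < (t : Int) := by exact_mod_cast Nat.pos_of_ne_zero h
      rw [changeBitsLoopA]
      rw [if_neg (by omega), if_neg (by omega)]
      rw [int_bor_pow, shiftR_natCast]
      rw [ih (t / 2) (Nat.div_lt_self (Nat.pos_of_ne_zero h) (by norm_num)) (i + 1)]
      rw [PySem.Int.bitLength_natCast (Nat.pos_of_ne_zero h)]
      ring_nf

-- ===== VERDICT =====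
theorem changeBits_spec : Claim_equal_changeBits := by
  intro N _ hPre
  unfold Pre_changeBits at hPre
  unfold Spec_changeBits changeBits changeBits_alt
  have hN : N = ((N.toNat : Nat) : Int) := by omega
  have h0 : changeBitsLoopA 0 N 0 = 2 ^ PySem.Int.bitLength N - 1 := by
    conv_lhs => rw [hN]
    rw [show (0:Int) = (2:Int)^(0:Nat) - 1 by norm_num, loopA_closed N.toNat 0]
    rw [← hN]; ring_nf
  have hs : ((1:Int) <<< PySem.Int.bitLength N) = 2 ^ PySem.Int.bitLength N := by
    simp [Int.shiftLeft_eq]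
  simp only [h0, hs]
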